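-- pv_equiv track=rewrite | github.com/axtolm/pm-training-alpha-miner | alpha-miner.py | split_nodes
-- ===== SOURCE A (Python) =====
-- import itertools
-- from copy import deepcopy
--
-- def split_nodes(in_nodes, arcs_connect_all):
--     '''
--     Split the input set of activities into a list of subsets,
--     where each subset is a set of actvities with only # relations.
--
--     Parameters
--     ----------
--     in_nodes : set
--         Set of activities for splitting,
--         e.g. {'e', 'f', 'c', 'd'}.
--     arcs_connect_all : set
--         Set of all arcs in the DFG (non # relations),
--         e.g. {'bd', 'ec', 'eg', 'bf',...}.
--     Returns
--     -------
--     nodes : list of sets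
--         List of sets, where each set is the set of actvities with # relations,
--         e.g. [{'e', 'f'}, {'c', 'f'}, {'d', 'e'}, {'c', 'd'}].
--
--     '''
--     nodes = [deepcopy(in_nodes)]   # an initial list with one input set
--     # get all posible pairs based on activities from the input set
--     # permutations(p[,r]): r-length tuples, all possible orderings, no repeated elements ('aa' pairs are not required)
--     arcs = {''.join(list(s)) for s in list(itertools.permutations(in_nodes,2))}
--     # get not # arcs from all posible pairs 'arcs'
--     arcs_connected = arcs.intersection(arcs_connect_all)
--     # merge pairs 'cd' and 'dc' into one 'cd'
--     arcs_connected_ordered = {''.join(sorted(s)) for s in arcs_connected}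
--     # split initial set into subsets with non-connected nodes
--     for carc in arcs_connected_ordered:
--         nodes_split = []
--         for node in nodes:
--             nodes_split.append({char if char != carc[0] else 'NaN' for char in node}.difference({'NaN'}))
--             nodes_split.append({char if char != carc[1] else 'NaN' for char in node}.difference({'NaN'}))
--         nodes = deepcopy(nodes_split)
--     return nodes
-- ===== SOURCE B (Python) =====
-- import itertools
--
-- def split_nodes(in_nodes, arcs_connect_all):
--     # one pass over the permutations: collect the connected arcs (merged 'cd'/'dc',
--     # first occurrence order), then enumerate the Cartesian product of per-arc
--     # endpoint removals directly instead of doubling a deep-copied list per arc.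
--     ordered, seen = [], set()
--     for p in itertools.permutations(in_nodes, 2):
--         arc = ''.join(p)
--         if arc in arcs_connect_all:
--             carc = ''.join(sorted(arc))
--             if carc not in seen:
--                 seen.add(carc)
--                 ordered.append(carc)
--     choices = [(carc[0], carc[1]) for carc in ordered]
--     return [in_nodes - set(combo) for combo in itertools.product(*choices)]
-- ===== Notes on version B (the rewrite author's own statement) =====
-- stated objective: idiomatic
-- what changed: B replaces A's per-arc doubling loop over a deep-copied list of sets by a single pass that collects the connected arcs and then maps one Cartesian-product enumeration of per-arc endpoint removals (set difference) over the input set, dropping the deepcopy and the 'NaN' sentinel substitution.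
-- intended difference: When in_nodes contains an activity literally named 'NaN' and at least one connected arc exists, A silently deletes 'NaN' from every returned subset (it is A's sentinel for removed endpoints), while B keeps it except where a genuine endpoint removal applies; keeping the real activity is the intended behaviour. — e.g. on split_nodes(["NaN", "a", "b"], ["ab"]): A returns [["b"], ["a"]], B returns [["NaN", "b"], ["NaN", "a"]]
import Mathlib
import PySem

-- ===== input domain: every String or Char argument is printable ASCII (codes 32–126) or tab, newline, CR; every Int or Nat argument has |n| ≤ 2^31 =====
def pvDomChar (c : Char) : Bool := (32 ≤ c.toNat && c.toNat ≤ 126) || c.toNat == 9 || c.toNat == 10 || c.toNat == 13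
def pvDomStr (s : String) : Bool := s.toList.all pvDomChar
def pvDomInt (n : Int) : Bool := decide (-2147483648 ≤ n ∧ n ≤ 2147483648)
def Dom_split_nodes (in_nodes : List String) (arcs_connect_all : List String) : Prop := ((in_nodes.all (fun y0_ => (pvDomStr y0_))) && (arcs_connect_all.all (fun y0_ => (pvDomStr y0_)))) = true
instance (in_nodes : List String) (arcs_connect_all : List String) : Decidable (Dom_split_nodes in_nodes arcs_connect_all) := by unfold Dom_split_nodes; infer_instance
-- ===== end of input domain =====

-- B collects the connected arcs in one pass and maps a Cartesian-product enumeration of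
-- per-arc endpoint removals over the input set, replacing A's per-arc doubling loop over a
-- deep-copied list and its 'NaN' sentinel substitution (B keeps an activity named 'NaN': D_ below).

-- ===== PORT A =====
-- Python s[i] on a string yields a 1-character string
def pvStr1 (c : Char) : String := String.ofList [c]

-- ''.join(sorted(s))
def pvSortStr (s : String) : String := String.ofList (PySem.List.sorted s.toList (fun c => c) false)

-- {char if char != carc[i] else 'NaN' for char in node}.difference({'NaN'})
def pvRemoveNaN (node : List String) (c : Char) : List String :=
  PySem.Set.diff (PySem.Set.ofList (node.map (fun ch => if ch ≠ pvStr1 c then ch else "NaN")))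
    (PySem.Set.ofList ["NaN"])

def split_nodes (in_nodes : List String) (arcs_connect_all : List String) : List (List String) :=
  let inSet : PySem.Set String := PySem.Set.ofList in_nodes
  let allSet : PySem.Set String := PySem.Set.ofList arcs_connect_all
  let nodes : List (List String) := [inSet]
  let arcs : PySem.Set String :=
    PySem.Set.ofList ((PySem.List.permutations inSet 2).map (fun s => PySem.Str.join "" s))
  let arcs_connected : PySem.Set String := PySem.Set.inter arcs allSet
  let arcs_connected_ordered : PySem.Set String :=
    PySem.Set.ofList (arcs_connected.map (fun s => pvSortStr s))
  -- carc[0]/carc[1] in total form; Pre_ excludes the inputs where Python raises IndexError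
  arcs_connected_ordered.foldl
    (fun nodes carc =>
      nodes.foldl
        (fun nodes_split node =>
          (nodes_split ++ [pvRemoveNaN node ((PySem.Str.pyGet? carc 0).getD ' ')]) ++
            [pvRemoveNaN node ((PySem.Str.pyGet? carc 1).getD ' ')])
        [])
    nodes

-- ===== PORT B =====
-- itertools.product(*choices), first factor most significant
def pvProduct : List (Char × Char) → List (List Char)
  | [] => [[]]
  | c :: rest => (pvProduct rest).map (c.1 :: ·) ++ (pvProduct rest).map (c.2 :: ·)

def split_nodes_alt (in_nodes : List String) (arcs_connect_all : List String) : List (List String) :=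
  let inSet : PySem.Set String := PySem.Set.ofList in_nodes
  let allSet : PySem.Set String := PySem.Set.ofList arcs_connect_all
  -- ordered, seen = [], set(); one pass over the permutations
  let st :=
    (PySem.List.permutations inSet 2).foldl
      (fun (st : List String × PySem.Set String) p =>
        let arc := PySem.Str.join "" p
        if PySem.Set.contains allSet arc then
          let carc := pvSortStr arc
          if PySem.Set.contains st.2 carc then st
          else (st.1 ++ [carc], PySem.Set.add st.2 carc)
        else st)
      ([], PySem.Set.empty)
  let choices := st.1.map (fun carc =>
    ((PySem.Str.pyGet? carc 0).getD ' ', (PySem.Str.pyGet? carc 1).getD ' '))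
  (pvProduct choices).map (fun combo =>
    PySem.Set.diff inSet (PySem.Set.ofList (combo.map pvStr1)))

-- ===== PRECONDITION & SPEC =====
-- Pre_ excludes exactly the inputs on which Python A raises IndexError: a connected pair of
-- distinct activities whose concatenation is shorter than 2 characters (one of them is '').
def Pre_split_nodes (in_nodes : List String) (arcs_connect_all : List String) : Prop :=
  ∀ a ∈ in_nodes, ∀ b ∈ in_nodes, a ≠ b → PySem.Str.join "" [a, b] ∈ arcs_connect_all →
    2 ≤ (PySem.Str.join "" [a, b]).toList.length

instance (in_nodes : List String) (arcs_connect_all : List String) :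
    Decidable (Pre_split_nodes in_nodes arcs_connect_all) := by
  unfold Pre_split_nodes; infer_instance

def pvWitness_split_nodes : List String × List String := (["a", "b"], ["ab"])

-- When in_nodes contains an activity literally named 'NaN' and at least one connected arc
-- exists, A silently deletes 'NaN' from every returned subset (its sentinel for removed
-- endpoints), while B keeps it; keeping the real activity is the intended behaviour.
def D_split_nodes (in_nodes : List String) (arcs_connect_all : List String) : Prop :=
  "NaN" ∈ in_nodes ∧
    ∃ a ∈ in_nodes, ∃ b ∈ in_nodes, a ≠ b ∧ PySem.Str.join "" [a, b] ∈ arcs_connect_all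

instance (in_nodes : List String) (arcs_connect_all : List String) :
    Decidable (D_split_nodes in_nodes arcs_connect_all) := by
  unfold D_split_nodes; infer_instance

def Spec_split_nodes (in_nodes : List String) (arcs_connect_all : List String)
    (out : List (List String)) : Prop :=
  ¬ D_split_nodes in_nodes arcs_connect_all → out = split_nodes_alt in_nodes arcs_connect_all

instance (in_nodes : List String) (arcs_connect_all : List String) (out : List (List String)) :
    Decidable (Spec_split_nodes in_nodes arcs_connect_all out) := by
  unfold Spec_split_nodes; infer_instance

def pvDiffWitness_split_nodes : List String × List String := (["NaN", "a", "b"], ["ab"])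

def pvDiffWitnessOut_split_nodes : (List (List String)) × (List (List String)) :=
  ([["b"], ["a"]], [["NaN", "b"], ["NaN", "a"]])

-- ===== CLAIM (what is proved, stated in full; the proofs are below) =====
def Claim_unchanged_split_nodes : Prop := ∀ (in_nodes : List String) (arcs_connect_all : List String), Dom_split_nodes in_nodes arcs_connect_all → Pre_split_nodes in_nodes arcs_connect_all → Spec_split_nodes in_nodes arcs_connect_all (split_nodes in_nodes arcs_connect_all)

def Claim_changed_split_nodes : Prop := Dom_split_nodes (pvDiffWitness_split_nodes.1) (pvDiffWitness_split_nodes.2) ∧ Pre_split_nodes (pvDiffWitness_split_nodes.1) (pvDiffWitness_split_nodes.2) ∧ D_split_nodes (pvDiffWitness_split_nodes.1) (pvDiffWitness_split_nodes.2) ∧ split_nodes (pvDiffWitness_split_nodes.1) (pvDiffWitness_split_nodes.2) = pvDiffWitnessOut_split_nodes.1 ∧ split_nodes_alt (pvDiffWitness_split_nodes.1) (pvDiffWitness_split_nodes.2) = pvDiffWitnessOut_split_nodes.2 ∧ pvDiffWitnessOut_split_nodes.1 ≠ pvDiffWitnessOut_split_nodes.2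

def Claim_exact_split_nodes : Prop := ∀ (in_nodes : List String) (arcs_connect_all : List String), Dom_split_nodes in_nodes arcs_connect_all → Pre_split_nodes in_nodes arcs_connect_all → D_split_nodes in_nodes arcs_connect_all → split_nodes in_nodes arcs_connect_all ≠ split_nodes_alt in_nodes arcs_connect_all

-- ===== LEMMAS AND PROOFS =====

-- the canonical list of merged connected arcs both ports compute
def pvTest (allSet : PySem.Set String) (p : List String) : Bool :=
  PySem.Set.contains allSet (PySem.Str.join "" p)

def pvAco (in_nodes : List String) (arcs_connect_all : List String) : List String :=
  PySem.Set.ofList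
    (((PySem.List.permutations (PySem.Set.ofList in_nodes) 2).filter
        (pvTest (PySem.Set.ofList arcs_connect_all))).map
      (fun p => pvSortStr (PySem.Str.join "" p)))

def pvEps (carc : String) : Char × Char :=
  ((PySem.Str.pyGet? carc 0).getD ' ', (PySem.Str.pyGet? carc 1).getD ' ')

-- A's doubling step, in flatMap form
def pvF (nodes : List (List String)) (carc : String) : List (List String) :=
  nodes.flatMap (fun node =>
    [pvRemoveNaN node ((PySem.Str.pyGet? carc 0).getD ' '),
     pvRemoveNaN node ((PySem.Str.pyGet? carc 1).getD ' ')])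

theorem filter_ofList {α : Type} [BEq α] [LawfulBEq α] (l : List α) (q : α → Bool) :
    (PySem.Set.ofList l).filter q = PySem.Set.ofList (l.filter q) := by
  induction l with
  | nil => simp [PySem.Set.ofList, PySem.Set.empty]
  | cons x xs ih =>
    rw [PySem.Set.ofList_cons]
    by_cases hq : q x
    · rw [List.filter_cons_of_pos hq, List.filter_cons_of_pos hq, PySem.Set.ofList_cons, ← ih]
      simp only [PySem.Set.discard, List.filter_filter]
      exact congrArg (x :: ·) (List.filter_congr (fun y _ => Bool.and_comm _ _))
    · rw [List.filter_cons_of_neg (by simpa using hq), List.filter_cons_of_neg (by simpa using hq), ← ih]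
      simp only [PySem.Set.discard, List.filter_filter]
      have h1 : (fun a => q a && !a == x) = (fun y => !y == x && q y) := by
        funext y; exact Bool.and_comm _ _
      rw [h1, ← List.filter_filter]
      apply List.filter_eq_self.mpr
      intro y hy
      simp only [List.mem_filter] at hy
      have : y ≠ x := by
        rintro rfl
        rw [hy.2] at hq; exact hq rfl
      simp [this]

theorem ofList_map_ofList {α β : Type} [BEq α] [LawfulBEq α] [BEq β] [LawfulBEq β]
    (l : List α) (g : α → β) :
    PySem.Set.ofList ((PySem.Set.ofList l).map g) = PySem.Set.ofList (l.map g) := by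
  induction l using List.reverseRecOn with
  | nil => rfl
  | append_singleton l x ih =>
    have hmap : List.map g (l ++ [x]) = List.map g l ++ [g x] := by simp
    rw [PySem.Set.ofList_append_singleton, hmap, PySem.Set.ofList_append_singleton]
    by_cases hx : x ∈ l
    · rw [PySem.Set.add_of_mem (by simpa [PySem.Set.mem_ofList] using hx), ih]
      rw [PySem.Set.add_of_mem (by simp only [PySem.Set.mem_ofList, List.mem_map]; exact ⟨x, hx, rfl⟩)]
    · rw [PySem.Set.add_of_not_mem (by simpa [PySem.Set.mem_ofList] using hx),
        show List.map g (PySem.Set.ofList l ++ [x]) = List.map g (PySem.Set.ofList l) ++ [g x] from by simp,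
        PySem.Set.ofList_append_singleton, ih]

theorem split_nodes_eq_fold (in_nodes arcs_connect_all : List String) :
    split_nodes in_nodes arcs_connect_all =
      (pvAco in_nodes arcs_connect_all).foldl pvF [PySem.Set.ofList in_nodes] := by
  show (PySem.Set.ofList ((PySem.Set.inter (PySem.Set.ofList ((PySem.List.permutations (PySem.Set.ofList in_nodes) 2).map (fun s => PySem.Str.join "" s))) (PySem.Set.ofList arcs_connect_all)).map (fun s => pvSortStr s))).foldl _ _ = _
  have haco : PySem.Set.ofList ((PySem.Set.inter (PySem.Set.ofList ((PySem.List.permutations (PySem.Set.ofList in_nodes) 2).map (fun s => PySem.Str.join "" s))) (PySem.Set.ofList arcs_connect_all)).map (fun s => pvSortStr s)) = pvAco in_nodes arcs_connect_all := by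
    rw [PySem.Set.inter, filter_ofList, ofList_map_ofList, List.filter_map, List.map_map, pvAco]
    rfl
  rw [haco]
  apply PySem.List.foldl_congr_mem
  intro nodes carc _
  have : (fun (nodes_split : List (List String)) node =>
      (nodes_split ++ [pvRemoveNaN node ((PySem.Str.pyGet? carc 0).getD ' ')]) ++
        [pvRemoveNaN node ((PySem.Str.pyGet? carc 1).getD ' ')]) =
      (fun nodes_split node => nodes_split ++
        [pvRemoveNaN node ((PySem.Str.pyGet? carc 0).getD ' '),
         pvRemoveNaN node ((PySem.Str.pyGet? carc 1).getD ' ')]) := by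
    funext a b; simp
  rw [this, PySem.List.foldl_append_eq_flatMap, pvF, List.nil_append]

theorem pair_fold (arcs_connect_all : List String) (ps : List (List String)) :
    ∀ (l : PySem.Set String),
      ps.foldl
        (fun (st : List String × PySem.Set String) p =>
          let arc := PySem.Str.join "" p
          if PySem.Set.contains (PySem.Set.ofList arcs_connect_all) arc then
            let carc := pvSortStr arc
            if PySem.Set.contains st.2 carc then st
            else (st.1 ++ [carc], PySem.Set.add st.2 carc)
          else st)
        (l, l) =
      (ps.foldl (fun s p => if pvTest (PySem.Set.ofList arcs_connect_all) p then
          PySem.Set.add s (pvSortStr (PySem.Str.join "" p)) else s) l,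
       ps.foldl (fun s p => if pvTest (PySem.Set.ofList arcs_connect_all) p then
          PySem.Set.add s (pvSortStr (PySem.Str.join "" p)) else s) l) := by
  induction ps with
  | nil => intro l; rfl
  | cons p ps ih =>
    intro l
    simp only [List.foldl_cons]
    by_cases ht : pvTest (PySem.Set.ofList arcs_connect_all) p
    · simp only [pvTest] at ht
      simp only [ht, if_true, pvTest]
      by_cases hc : PySem.Set.contains l (pvSortStr (PySem.Str.join "" p))
      · have : PySem.Set.add l (pvSortStr (PySem.Str.join "" p)) = l := by
          exact PySem.Set.add_of_mem ((PySem.Set.contains_iff _ _).mp hc)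
        simp only [hc, if_true, this]
        exact ih l
      · have : PySem.Set.add l (pvSortStr (PySem.Str.join "" p)) = l ++ [pvSortStr (PySem.Str.join "" p)] := by
          apply PySem.Set.add_of_not_mem
          intro hm; exact hc ((PySem.Set.contains_iff _ _).mpr hm)
        simp only [hc, this]
        exact ih _
    · simp only [pvTest] at ht
      simp only [ht, pvTest]
      exact ih l

theorem split_nodes_alt_eq_product (in_nodes arcs_connect_all : List String) :
    split_nodes_alt in_nodes arcs_connect_all =
      (pvProduct ((pvAco in_nodes arcs_connect_all).map pvEps)).map (fun combo =>
        PySem.Set.diff (PySem.Set.ofList in_nodes) (PySem.Set.ofList (combo.map pvStr1))) := by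
  show (pvProduct (((PySem.List.permutations (PySem.Set.ofList in_nodes) 2).foldl _ ([], PySem.Set.empty)).1.map _)).map _ = _
  rw [show (([], PySem.Set.empty) : List String × PySem.Set String) = ((PySem.Set.empty : PySem.Set String), (PySem.Set.empty : PySem.Set String)) from rfl]
  rw [pair_fold arcs_connect_all]
  rw [PySem.List.foldl_if_eq_foldl_filter]
  rw [show (fun (s : PySem.Set String) (p : List String) => PySem.Set.add s (pvSortStr (PySem.Str.join "" p))) = (fun s p => PySem.Set.add s ((fun p => pvSortStr (PySem.Str.join "" p)) p)) from rfl]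
  rw [← PySem.Set.update_map_eq_foldl_add, PySem.Set.update_empty, pvAco]
  rfl

theorem removeNaN_eq_filter (S : List String) (hnd : S.Nodup) (hS : "NaN" ∉ S) (c : Char) :
    pvRemoveNaN S c = S.filter (fun x => x ≠ pvStr1 c) := by
  rw [pvRemoveNaN, PySem.Set.diff, filter_ofList]
  have hpred : (fun x : String => !(PySem.Set.ofList ["NaN"]).contains x) =
      (fun x : String => !(x == "NaN")) := by
    funext x
    by_cases h : x = "NaN" <;>
      simp [h, PySem.Set.ofList, PySem.Set.contains, PySem.Set.add, PySem.Set.empty]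
  rw [hpred]
  have h1 : (List.map (fun ch => if ch ≠ pvStr1 c then ch else "NaN") S).filter
      (fun x : String => !(x == "NaN")) = S.filter (fun x => x ≠ pvStr1 c) := by
    induction S with
    | nil => rfl
    | cons x xs ih =>
      have hx : x ≠ "NaN" := fun h => hS (h ▸ List.mem_cons_self)
      have ih' := ih (List.Nodup.of_cons hnd) (fun h => hS (List.mem_cons_of_mem _ h))
      by_cases hc : x = pvStr1 c
      · subst hc
        simpa using ih'
      · simpa [hc, hx] using ih'
  rw [h1]
  exact PySem.Set.ofList_eq_self_of_nodup _ (List.Nodup.filter _ hnd)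

theorem foldF_append (cs : List String) : ∀ (n1 n2 : List (List String)),
    cs.foldl pvF (n1 ++ n2) = cs.foldl pvF n1 ++ cs.foldl pvF n2 := by
  induction cs with
  | nil => intro n1 n2; rfl
  | cons c cs ih =>
    intro n1 n2
    simp only [List.foldl_cons]
    rw [show pvF (n1 ++ n2) c = pvF n1 c ++ pvF n2 c from List.flatMap_append, ih]

theorem diff_ofList_cons (S : List String) (a : Char) (l : List Char) :
    PySem.Set.diff S (PySem.Set.ofList ((a :: l).map pvStr1)) =
      PySem.Set.diff (S.filter (fun x => x ≠ pvStr1 a)) (PySem.Set.ofList (l.map pvStr1)) := by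
  simp only [PySem.Set.diff, List.filter_filter]
  apply List.filter_congr
  intro x _
  by_cases h1 : x = pvStr1 a
  · subst h1
    have : (PySem.Set.ofList (List.map pvStr1 (a :: l))).contains (pvStr1 a) = true := by
      apply (PySem.Set.contains_iff _ _).mpr
      rw [PySem.Set.mem_ofList]
      exact List.mem_map_of_mem List.mem_cons_self
    simp
  · have e1 : (PySem.Set.ofList (List.map pvStr1 (a :: l))).contains x =
        (PySem.Set.ofList (List.map pvStr1 l)).contains x := by
      by_cases h2 : x ∈ List.map pvStr1 l
      · rw [(PySem.Set.contains_iff _ _).mpr (by rw [PySem.Set.mem_ofList]; exact List.mem_map.mpr (by rcases List.mem_map.mp h2 with ⟨y, hy, rfl⟩; exact ⟨y, List.mem_cons_of_mem _ hy, rfl⟩)),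
          (PySem.Set.contains_iff _ _).mpr (by rw [PySem.Set.mem_ofList]; exact h2)]
      · have hn1 : x ∉ PySem.Set.ofList (List.map pvStr1 (a :: l)) := by
          rw [PySem.Set.mem_ofList]
          intro hm
          rcases List.mem_map.mp hm with ⟨y, hy, rfl⟩
          rcases List.mem_cons.mp hy with rfl | hy'
          · exact h1 rfl
          · exact h2 (List.mem_map_of_mem hy')
        have hn2 : x ∉ PySem.Set.ofList (List.map pvStr1 l) := by
          rw [PySem.Set.mem_ofList]; exact h2
        rw [Bool.eq_false_iff.mpr (fun hcon => hn1 ((PySem.Set.contains_iff _ _).mp hcon)),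
          Bool.eq_false_iff.mpr (fun hcon => hn2 ((PySem.Set.contains_iff _ _).mp hcon))]
    simp [h1]

theorem fold_eq_product (cs : List String) : ∀ (S : List String), S.Nodup → "NaN" ∉ S →
    cs.foldl pvF [S] =
      (pvProduct (cs.map pvEps)).map (fun combo =>
        PySem.Set.diff S (PySem.Set.ofList (combo.map pvStr1))) := by
  induction cs with
  | nil =>
    intro S hnd hS
    simp [pvProduct, PySem.Set.diff, PySem.Set.ofList, PySem.Set.empty, PySem.Set.contains]
  | cons c cs ih =>
    intro S hnd hS
    simp only [List.foldl_cons, List.map_cons]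
    have hF : pvF [S] c = [S.filter (fun x => x ≠ pvStr1 (pvEps c).1)] ++ [S.filter (fun x => x ≠ pvStr1 (pvEps c).2)] := by
      simp only [pvF, List.flatMap_cons, List.flatMap_nil, List.append_nil]
      rw [removeNaN_eq_filter S hnd hS, removeNaN_eq_filter S hnd hS]
      rfl
    rw [hF, foldF_append]
    have h0 := ih (S.filter (fun x => x ≠ pvStr1 (pvEps c).1)) (List.Nodup.filter _ hnd)
      (fun h => hS (List.mem_of_mem_filter h))
    have h1 := ih (S.filter (fun x => x ≠ pvStr1 (pvEps c).2)) (List.Nodup.filter _ hnd)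
      (fun h => hS (List.mem_of_mem_filter h))
    rw [h0, h1]
    show _ = ((pvProduct (cs.map pvEps)).map ((pvEps c).1 :: ·) ++ (pvProduct (cs.map pvEps)).map ((pvEps c).2 :: ·)).map _
    rw [List.map_append, List.map_map, List.map_map]
    congr 1
    · apply List.map_congr_left
      intro combo _
      show PySem.Set.diff (S.filter (fun x => x ≠ pvStr1 (pvEps c).1)) (PySem.Set.ofList (combo.map pvStr1)) =
        PySem.Set.diff S (PySem.Set.ofList (((pvEps c).1 :: combo).map pvStr1))
      rw [diff_ofList_cons]
    · apply List.map_congr_left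
      intro combo _
      show PySem.Set.diff (S.filter (fun x => x ≠ pvStr1 (pvEps c).2)) (PySem.Set.ofList (combo.map pvStr1)) =
        PySem.Set.diff S (PySem.Set.ofList (((pvEps c).2 :: combo).map pvStr1))
      rw [diff_ofList_cons]

theorem mem_permutations_one {α : Type} (ys p : List α) :
    p ∈ PySem.List.permutations ys 1 ↔ ∃ b ∈ ys, p = [b] := by
  rw [PySem.List.permutations]
  constructor
  · intro h
    rcases List.mem_flatMap.mp h with ⟨j, hj, hmem⟩
    rw [List.mem_range] at hj
    rw [List.getElem?_eq_getElem hj] at hmem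
    simp only [PySem.List.permutations_zero, List.map_cons, List.map_nil, List.mem_singleton] at hmem
    exact ⟨ys[j], List.getElem_mem hj, hmem⟩
  · rintro ⟨b, hb, rfl⟩
    rcases List.mem_iff_getElem.mp hb with ⟨j, hj, rfl⟩
    apply List.mem_flatMap.mpr
    refine ⟨j, List.mem_range.mpr hj, ?_⟩
    rw [List.getElem?_eq_getElem hj]
    simp [PySem.List.permutations_zero]

theorem mem_permutations_two {α : Type} (xs p : List α) (hnd : xs.Nodup)
    (hp : p ∈ PySem.List.permutations xs 2) :
    ∃ a b, p = [a, b] ∧ a ∈ xs ∧ b ∈ xs ∧ a ≠ b := by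
  obtain ⟨hlen, rest, hperm⟩ := PySem.List.exists_perm_of_mem_permutations 2 xs p hp
  match p, hlen with
  | [a, b], _ =>
    refine ⟨a, b, rfl, PySem.List.mem_of_mem_of_mem_permutations hp (by simp),
      PySem.List.mem_of_mem_of_mem_permutations hp (by simp), ?_⟩
    have hnd2 : ([a, b] ++ rest).Nodup := (hperm.nodup_iff).mpr hnd
    have := (List.nodup_append.mp hnd2).1
    simp only [List.nodup_cons, List.mem_singleton] at this
    exact this.1

theorem mem_permutations_two_of {α : Type} (xs : List α) (a b : α)
    (ha : a ∈ xs) (hb : b ∈ xs) (hab : a ≠ b) :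
    [a, b] ∈ PySem.List.permutations xs 2 := by
  rcases List.mem_iff_getElem.mp ha with ⟨i, hi, rfl⟩
  rw [PySem.List.permutations]
  apply List.mem_flatMap.mpr
  refine ⟨i, List.mem_range.mpr hi, ?_⟩
  rw [List.getElem?_eq_getElem hi]
  simp only [List.mem_map]
  refine ⟨[b], ?_, rfl⟩
  apply (mem_permutations_one _ _).mpr
  refine ⟨b, ?_, rfl⟩
  rcases List.mem_iff_getElem.mp hb with ⟨j, hj, rfl⟩
  apply List.mem_eraseIdx_iff_getElem.mpr
  refine ⟨j, hj, ?_, rfl⟩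
  intro hji
  subst hji
  exact hab rfl

theorem pvAco_keys (in_nodes arcs_connect_all : List String) :
    pvAco in_nodes arcs_connect_all = [] ↔
      ¬ ∃ a ∈ in_nodes, ∃ b ∈ in_nodes, a ≠ b ∧
          PySem.Str.join "" [a, b] ∈ arcs_connect_all := by
  constructor
  · intro hnil hex
    rcases hex with ⟨a, ha, b, hb, hab, hmem⟩
    have hpm : [a, b] ∈ PySem.List.permutations (PySem.Set.ofList in_nodes) 2 :=
      mem_permutations_two_of _ a b ((PySem.Set.mem_ofList _ _).mpr ha)
        ((PySem.Set.mem_ofList _ _).mpr hb) hab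
    have htest : pvTest (PySem.Set.ofList arcs_connect_all) [a, b] = true := by
      apply (PySem.Set.contains_iff _ _).mpr
      exact (PySem.Set.mem_ofList _ _).mpr hmem
    have hmemf : [a, b] ∈ (PySem.List.permutations (PySem.Set.ofList in_nodes) 2).filter
        (pvTest (PySem.Set.ofList arcs_connect_all)) := List.mem_filter.mpr ⟨hpm, htest⟩
    have hmm : pvSortStr (PySem.Str.join "" [a, b]) ∈
        ((PySem.List.permutations (PySem.Set.ofList in_nodes) 2).filter
          (pvTest (PySem.Set.ofList arcs_connect_all))).map
            (fun p => pvSortStr (PySem.Str.join "" p)) := List.mem_map_of_mem hmemf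
    have : pvSortStr (PySem.Str.join "" [a, b]) ∈ pvAco in_nodes arcs_connect_all := by
      rw [pvAco]
      exact (PySem.Set.mem_ofList _ _).mpr hmm
    rw [hnil] at this
    exact (List.not_mem_nil) this
  · intro hno
    rw [pvAco]
    have hfil : (PySem.List.permutations (PySem.Set.ofList in_nodes) 2).filter
        (pvTest (PySem.Set.ofList arcs_connect_all)) = [] := by
      apply List.filter_eq_nil_iff.mpr
      intro p hp htest
      rcases mem_permutations_two _ p (PySem.Set.nodup_ofList _) hp with ⟨a, b, rfl, ha, hb, hab⟩
      exact hno ⟨a, (PySem.Set.mem_ofList _ _).mp ha, b, (PySem.Set.mem_ofList _ _).mp hb, hab,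
        (PySem.Set.mem_ofList _ _).mp ((PySem.Set.contains_iff _ _).mp htest)⟩
    rw [hfil]
    rfl

theorem NaN_not_mem_removeNaN (node : List String) (c : Char) :
    "NaN" ∉ pvRemoveNaN node c := by
  intro h
  rw [pvRemoveNaN] at h
  have := (PySem.Set.mem_diff _ _ _).mp h
  exact this.2 ((PySem.Set.mem_ofList _ _).mpr (List.mem_singleton.mpr rfl))

theorem foldF_head (cs : List String) (hcs : cs ≠ []) :
    ∀ (S : List String) (nodes : List (List String)),
      ∃ H t, cs.foldl pvF (S :: nodes) = H :: t ∧ "NaN" ∉ H := by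
  induction cs with
  | nil => exact absurd rfl hcs
  | cons c cs ih =>
    intro S nodes
    have hstep : pvF (S :: nodes) c =
        pvRemoveNaN S ((PySem.Str.pyGet? c 0).getD ' ') ::
          (pvRemoveNaN S ((PySem.Str.pyGet? c 1).getD ' ') ::
            nodes.flatMap (fun node =>
              [pvRemoveNaN node ((PySem.Str.pyGet? c 0).getD ' '),
               pvRemoveNaN node ((PySem.Str.pyGet? c 1).getD ' ')])) := by
      simp [pvF]
    rcases List.eq_nil_or_concat cs with rfl | _
    · refine ⟨pvRemoveNaN S ((PySem.Str.pyGet? c 0).getD ' '),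
        pvRemoveNaN S ((PySem.Str.pyGet? c 1).getD ' ') ::
          nodes.flatMap (fun node =>
            [pvRemoveNaN node ((PySem.Str.pyGet? c 0).getD ' '),
             pvRemoveNaN node ((PySem.Str.pyGet? c 1).getD ' ')]),
        ?_, NaN_not_mem_removeNaN _ _⟩
      simp only [List.foldl_cons, List.foldl_nil, hstep]
    · have hne : cs ≠ [] := by
        rename_i hconc
        rcases hconc with ⟨l, x, rfl⟩
        simp
      simp only [List.foldl_cons, hstep]
      exact ih hne _ _

theorem pvProduct_ne_nil (l : List (Char × Char)) : pvProduct l ≠ [] := by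
  induction l with
  | nil => simp [pvProduct]
  | cons c rest ih =>
    simp only [pvProduct, ne_eq, List.append_eq_nil_iff, List.map_eq_nil_iff]
    intro h
    exact ih h.1

-- ===== VERDICT (by name: the statement is the Claim_ definition above) =====
theorem pvStr1_ne_NaN (ch : Char) : pvStr1 ch ≠ "NaN" := by
  intro hcon
  have hlen := congrArg (fun s => s.toList.length) hcon
  simp [pvStr1] at hlen

theorem split_nodes_spec : Claim_unchanged_split_nodes := by
  unfold Claim_unchanged_split_nodes
  intro in_nodes arcs_connect_all hDom hPre
  unfold Spec_split_nodes
  intro hD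
  rw [split_nodes_eq_fold, split_nodes_alt_eq_product]
  by_cases hN : "NaN" ∈ in_nodes
  · have hnp : ¬ ∃ a ∈ in_nodes, ∃ b ∈ in_nodes, a ≠ b ∧
        PySem.Str.join "" [a, b] ∈ arcs_connect_all := fun hex => hD ⟨hN, hex⟩
    rw [(pvAco_keys _ _).mpr hnp]
    simp [pvProduct, PySem.Set.diff, PySem.Set.ofList, PySem.Set.empty, PySem.Set.contains]
  · apply fold_eq_product _ _ (PySem.Set.nodup_ofList _)
    intro h
    exact hN ((PySem.Set.mem_ofList _ _).mp h)

theorem split_nodes_changed : Claim_changed_split_nodes := by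
  unfold Claim_changed_split_nodes; decide

theorem split_nodes_tight : Claim_exact_split_nodes := by
  unfold Claim_exact_split_nodes
  intro in_nodes arcs_connect_all hDom hPre hD heq
  obtain ⟨hN, hex⟩ := hD
  have hne : pvAco in_nodes arcs_connect_all ≠ [] :=
    fun h => ((pvAco_keys in_nodes arcs_connect_all).mp h) hex
  rw [split_nodes_eq_fold, split_nodes_alt_eq_product] at heq
  rcases hacoeq : pvAco in_nodes arcs_connect_all with _ | ⟨c, cs⟩
  · exact hne hacoeq
  · rw [hacoeq] at heq
    obtain ⟨H, t, hA, hHnaN⟩ := foldF_head (c :: cs) (by simp)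
      (PySem.Set.ofList in_nodes) []
    rw [hA] at heq
    rcases hP : pvProduct (cs.map pvEps) with _ | ⟨q, P'⟩
    · exact pvProduct_ne_nil _ hP
    · simp only [List.map_cons, pvProduct, hP, List.map_append, List.cons_append] at heq
      have hhead : H = PySem.Set.diff (PySem.Set.ofList in_nodes)
          (PySem.Set.ofList (((pvEps c).1 :: q).map pvStr1)) := (List.cons_eq_cons.mp heq).1
      apply hHnaN
      rw [hhead]
      apply (PySem.Set.mem_diff _ _ _).mpr
      refine ⟨(PySem.Set.mem_ofList _ _).mpr hN, ?_⟩
      intro hmem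
      rcases List.mem_map.mp ((PySem.Set.mem_ofList _ _).mp hmem) with ⟨ch, _, hcon⟩
      exact pvStr1_ne_NaN ch hcon
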